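-- pv_equiv track=rewrite | github.com/solean/leetcode | 2599_make_the_prefix_sum_non_negative.py | makePrefSumNonNegative
-- ===== SOURCE A (Python) =====
-- from typing import List
-- import heapq
--
-- def makePrefSumNonNegative(nums: List[int]) -> int:
--     res = 0
--     ps = 0
--     min_heap = []
--
--     for n in nums:
--         if n < 0:
--             heapq.heappush(min_heap, n)
--
--         ps += n
--         if ps < 0:
--             min_seen = heapq.heappop(min_heap)
--             ps -= min_seen
--             res += 1
--
--     return res
-- ===== SOURCE B (Python) =====
-- from typing import List
--
-- def makePrefSumNonNegative(nums: List[int]) -> int: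
--     res = 0
--     ps = 0
--     negs = []
--
--     for n in nums:
--         if n < 0:
--             negs.append(n)
--
--         ps += n
--         if ps < 0:
--             m = min(negs)
--             negs.remove(m)
--             ps -= m
--             res += 1
--
--     return res
-- ===== Notes on version B (the rewrite author's own statement) =====
-- stated objective: simpler
-- what changed: The binary min-heap (heapq push/pop with sift operations) is replaced by a plain list of the negatives seen so far: when the prefix sum dips below zero, B scans the list with min() and removes that element, so no heap structure is maintained at all.
import Mathlib
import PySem

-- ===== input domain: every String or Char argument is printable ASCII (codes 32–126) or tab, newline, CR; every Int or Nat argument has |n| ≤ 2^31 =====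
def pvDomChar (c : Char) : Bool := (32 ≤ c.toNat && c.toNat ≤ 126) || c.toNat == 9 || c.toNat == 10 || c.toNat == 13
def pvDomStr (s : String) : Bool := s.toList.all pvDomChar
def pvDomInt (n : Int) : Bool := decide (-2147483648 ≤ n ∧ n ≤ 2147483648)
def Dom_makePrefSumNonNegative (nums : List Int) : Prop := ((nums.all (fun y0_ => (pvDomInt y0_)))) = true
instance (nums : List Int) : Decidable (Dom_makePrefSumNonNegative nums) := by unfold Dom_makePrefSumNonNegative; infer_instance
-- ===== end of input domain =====

-- B replaces A's binary min-heap (heapq) by a plain list of the negatives seen so far,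
-- scanned with min() and pruned with remove() when the prefix sum dips below zero.

-- ===== PORT A =====
-- heapq is not covered by PySem, so CPython's heapq (_siftdown, _siftup, heappush,
-- heappop) is ported by hand, step for step; 'heap[i]' is getD i 0 (exact: every index
-- heapq reads is in range) and 'heap[i] = x' is List.set.

-- CPython _siftdown(heap, startpos, pos), with newitem = heap[pos] (read once at entry,
-- the slot at pos is only ever written afterwards) carried as an argument.
def pySiftdown (heap : List Int) (startpos pos : Nat) (newitem : Int) : List Int :=
  if _h : startpos < pos then
    let parentpos := (pos - 1) / 2
    let parent := heap.getD parentpos 0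
    if newitem < parent then
      pySiftdown (heap.set pos parent) startpos parentpos newitem
    else
      heap.set pos newitem
  else
    heap.set pos newitem
termination_by pos
decreasing_by omega

-- CPython _siftup(heap, pos) while-loop, with startpos and newitem = heap[pos] carried
-- as arguments; the 'childpos = rightpos' reassignment becomes the first branch.
def pySiftupLoop (heap : List Int) (startpos pos : Nat) (newitem : Int) : List Int :=
  if _h : 2 * pos + 1 < heap.length then
    if 2 * pos + 1 + 1 < heap.length ∧ ¬ (heap.getD (2 * pos + 1) 0 < heap.getD (2 * pos + 1 + 1) 0) then
      pySiftupLoop (heap.set pos (heap.getD (2 * pos + 1 + 1) 0)) startpos (2 * pos + 1 + 1) newitem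
    else
      pySiftupLoop (heap.set pos (heap.getD (2 * pos + 1) 0)) startpos (2 * pos + 1) newitem
  else
    -- after the loop: heap[pos] = newitem; _siftdown(heap, startpos, pos)
    pySiftdown (heap.set pos newitem) startpos pos newitem
termination_by heap.length - pos
decreasing_by all_goals simp [List.length_set]; omega

-- heapq.heappush: heap.append(item); _siftdown(heap, 0, len(heap)-1)
def pyHeappush (heap : List Int) (item : Int) : List Int :=
  pySiftdown (heap ++ [item]) 0 heap.length item

-- heapq.heappop: lastelt = heap.pop(); if heap: swap lastelt to the root and _siftup;
-- none = IndexError on an empty heap.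
def pyHeappop (heap : List Int) : Option (Int × List Int) :=
  match heap.getLast? with
  | none => none
  | some lastelt =>
    let rest := heap.dropLast
    if rest.isEmpty then some (lastelt, rest)
    else
      some (rest.getD 0 0, pySiftupLoop (rest.set 0 lastelt) 0 0 lastelt)

-- the for-loop of A
def goA : List Int → Int → Int → List Int → Int
  | [], res, _, _ => res
  | n :: rest, res, ps, heap =>
    let heap' := if n < 0 then pyHeappush heap n else heap
    let ps' := ps + n
    if ps' < 0 then
      match pyHeappop heap' with
      | some (m, heap'') => goA rest (res + 1) (ps' - m) heap''
      | none => goA rest res ps' heap'  -- unreachable: Python raises IndexError here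
    else goA rest res ps' heap'

def makePrefSumNonNegative (nums : List Int) : Int := goA nums 0 0 []

-- ===== PORT B =====
-- the for-loop of B: negs collects the negatives; min()/remove() replace the heap
def goB : List Int → Int → Int → List Int → Int
  | [], res, _, _ => res
  | n :: rest, res, ps, negs =>
    let negs' := if n < 0 then negs ++ [n] else negs
    let ps' := ps + n
    if ps' < 0 then
      match PySem.List.min? negs' (fun x => x) with
      | some m =>
        match PySem.List.remove? negs' m with
        | some negs'' => goB rest (res + 1) (ps' - m) negs''
        | none => goB rest res ps' negs'  -- unreachable: m ∈ negs'
      | none => goB rest res ps' negs'   -- unreachable: Python's min([]) raises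
    else goB rest res ps' negs'

def makePrefSumNonNegative_alt (nums : List Int) : Int := goB nums 0 0 []

-- ===== PRECONDITION & SPEC =====
def Spec_makePrefSumNonNegative (nums : List Int) (out : Int) : Prop := out = makePrefSumNonNegative_alt nums
instance (nums : List Int) (out : Int) : Decidable (Spec_makePrefSumNonNegative nums out) := by unfold Spec_makePrefSumNonNegative; infer_instance

-- ===== CLAIM (what is proved, stated in full; the proofs are below) =====
def Claim_equal_makePrefSumNonNegative : Prop := ∀ (nums : List Int), Dom_makePrefSumNonNegative nums → Spec_makePrefSumNonNegative nums (makePrefSumNonNegative nums)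

-- ===== LEMMAS AND PROOFS =====

-- the binary-heap ordering invariant of heapq's array encoding
def IsHeapL (l : List Int) : Prop :=
  ∀ j, 0 < j → j < l.length → l.getD ((j - 1) / 2) 0 ≤ l.getD j 0

theorem getD_set_self (l : List Int) (i : Nat) (a : Int) (h : i < l.length) :
    (l.set i a).getD i 0 = a := by
  rw [List.getD_eq_getElem _ _ (by simpa using h)]
  simp

theorem getD_set_ne (l : List Int) (i j : Nat) (a : Int) (h : i ≠ j) :
    (l.set i a).getD j 0 = l.getD j 0 := by
  by_cases hj : j < l.length
  · rw [List.getD_eq_getElem _ _ (by simpa using hj), List.getD_eq_getElem _ _ hj]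
    exact List.getElem_set_ne h _
  · rw [List.getD_eq_default _ _ (by simpa using hj), List.getD_eq_default _ _ (by omega)]

theorem getD_append_left (l t : List Int) (i : Nat) (h : i < l.length) :
    (l ++ t).getD i 0 = l.getD i 0 := by
  rw [List.getD_eq_getElem _ _ (by simp; omega), List.getD_eq_getElem _ _ h]
  exact List.getElem_append_left h

theorem coe_append_singleton (l : List Int) (x : Int) :
    (↑(l ++ [x]) : Multiset Int) = (↑l : Multiset Int) + {x} := by
  induction l with
  | nil => simp
  | cons a t ih => simp only [List.cons_append, ← Multiset.cons_coe, ih, Multiset.cons_add]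

-- multiset accounting for List.set
theorem mset_set (l : List Int) (i : Nat) (a : Int) (h : i < l.length) :
    (↑(l.set i a) : Multiset Int) + {l.getD i 0} = (↑l : Multiset Int) + {a} := by
  induction l generalizing i with
  | nil => simp at h
  | cons x t ih =>
    cases i with
    | zero =>
      show (↑(a :: t) : Multiset Int) + {x} = (↑(x :: t) : Multiset Int) + {a}
      rw [← Multiset.cons_coe, ← Multiset.cons_coe, add_comm, Multiset.singleton_add,
        add_comm (x ::ₘ (↑t : Multiset Int)) {a}, Multiset.singleton_add, Multiset.cons_swap]
    | succ i =>
      have hi : i < t.length := by simpa using h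
      show (↑(x :: t.set i a) : Multiset Int) + {t.getD i 0} = (↑(x :: t) : Multiset Int) + {a}
      rw [← Multiset.cons_coe, ← Multiset.cons_coe, Multiset.cons_add, Multiset.cons_add, ih i hi]

theorem mset_siftdown (pos : Nat) : ∀ (heap : List Int) (sp : Nat) (ni : Int), pos < heap.length →
    (↑(pySiftdown heap sp pos ni) : Multiset Int) + {heap.getD pos 0} = (↑heap : Multiset Int) + {ni} := by
  induction pos using Nat.strong_induction_on with
  | _ pos ih =>
    intro heap sp ni h
    rw [pySiftdown]
    by_cases h0 : sp < pos
    · simp only [dif_pos h0]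
      by_cases hni : ni < heap.getD ((pos - 1) / 2) 0
      · simp only [if_pos hni]
        have ih' := ih ((pos - 1) / 2) (by omega) (heap.set pos (heap.getD ((pos - 1) / 2) 0)) sp ni
          (by simp [List.length_set]; omega)
        rw [getD_set_ne _ _ _ _ (by omega)] at ih'
        have hk := mset_set heap pos (heap.getD ((pos - 1) / 2) 0) h
        apply add_right_cancel (b := ({heap.getD ((pos - 1) / 2) 0} : Multiset Int))
        calc (↑(pySiftdown (heap.set pos (heap.getD ((pos - 1) / 2) 0)) sp ((pos - 1) / 2) ni) : Multiset Int)
              + {heap.getD pos 0} + {heap.getD ((pos - 1) / 2) 0}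
            = (↑(pySiftdown (heap.set pos (heap.getD ((pos - 1) / 2) 0)) sp ((pos - 1) / 2) ni) : Multiset Int)
              + {heap.getD ((pos - 1) / 2) 0} + {heap.getD pos 0} := add_right_comm _ _ _
          _ = ↑(heap.set pos (heap.getD ((pos - 1) / 2) 0)) + {ni} + {heap.getD pos 0} := by rw [ih']
          _ = ↑(heap.set pos (heap.getD ((pos - 1) / 2) 0)) + {heap.getD pos 0} + {ni} := add_right_comm _ _ _
          _ = ↑heap + {heap.getD ((pos - 1) / 2) 0} + {ni} := by rw [hk]
          _ = ↑heap + {ni} + {heap.getD ((pos - 1) / 2) 0} := add_right_comm _ _ _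
      · simp only [if_neg hni]
        exact mset_set heap pos ni h
    · simp only [dif_neg h0]
      exact mset_set heap pos ni h

theorem mset_siftupLoop_aux (heap : List Int) (sp pos cp' : Nat) (ni : Int)
    (h : pos < heap.length) (hne : pos ≠ cp')
    (ihres : (↑(pySiftupLoop (heap.set pos (heap.getD cp' 0)) sp cp' ni) : Multiset Int)
        + {(heap.set pos (heap.getD cp' 0)).getD cp' 0} = ↑(heap.set pos (heap.getD cp' 0)) + {ni}) :
    (↑(pySiftupLoop (heap.set pos (heap.getD cp' 0)) sp cp' ni) : Multiset Int) + {heap.getD pos 0}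
      = (↑heap : Multiset Int) + {ni} := by
  rw [getD_set_ne _ _ _ _ hne] at ihres
  have hk := mset_set heap pos (heap.getD cp' 0) h
  apply add_right_cancel (b := ({heap.getD cp' 0} : Multiset Int))
  calc (↑(pySiftupLoop (heap.set pos (heap.getD cp' 0)) sp cp' ni) : Multiset Int)
        + {heap.getD pos 0} + {heap.getD cp' 0}
      = (↑(pySiftupLoop (heap.set pos (heap.getD cp' 0)) sp cp' ni) : Multiset Int)
        + {heap.getD cp' 0} + {heap.getD pos 0} := add_right_comm _ _ _
    _ = ↑(heap.set pos (heap.getD cp' 0)) + {ni} + {heap.getD pos 0} := by rw [ihres]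
    _ = ↑(heap.set pos (heap.getD cp' 0)) + {heap.getD pos 0} + {ni} := add_right_comm _ _ _
    _ = ↑heap + {heap.getD cp' 0} + {ni} := by rw [hk]
    _ = ↑heap + {ni} + {heap.getD cp' 0} := add_right_comm _ _ _

theorem mset_siftupLoop (k : Nat) : ∀ (heap : List Int) (sp pos : Nat) (ni : Int),
    heap.length - pos ≤ k → pos < heap.length →
    (↑(pySiftupLoop heap sp pos ni) : Multiset Int) + {heap.getD pos 0} = (↑heap : Multiset Int) + {ni} := by
  induction k using Nat.strong_induction_on with
  | _ k ih =>
    intro heap sp pos ni hk h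
    rw [pySiftupLoop]
    by_cases hc : 2 * pos + 1 < heap.length
    · simp only [dif_pos hc]
      by_cases hcond : 2 * pos + 1 + 1 < heap.length ∧ ¬ (heap.getD (2 * pos + 1) 0 < heap.getD (2 * pos + 1 + 1) 0)
      · simp only [if_pos hcond]
        exact mset_siftupLoop_aux heap sp pos (2 * pos + 1 + 1) ni h (by omega)
          (ih (k - 1) (by omega) _ sp (2 * pos + 1 + 1) ni (by simp [List.length_set]; omega)
            (by simp [List.length_set]; omega))
      · simp only [if_neg hcond]
        exact mset_siftupLoop_aux heap sp pos (2 * pos + 1) ni h (by omega)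
          (ih (k - 1) (by omega) _ sp (2 * pos + 1) ni (by simp [List.length_set]; omega)
            (by simp [List.length_set]; omega))
    · simp only [dif_neg hc]
      have h1 := mset_siftdown pos (heap.set pos ni) sp ni (by simpa using h)
      rw [getD_set_self _ _ _ h] at h1
      have h2 := add_right_cancel h1
      rw [h2]
      exact mset_set heap pos ni h

-- placing newitem in the hole at pos keeps the heap shape (used by both sift base cases)
theorem isHeap_set (heap : List Int) (pos : Nat) (ni : Int) (h : pos < heap.length)
    (hA : ∀ j, 0 < j → j < heap.length → j ≠ pos → (j - 1) / 2 ≠ pos →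
      heap.getD ((j - 1) / 2) 0 ≤ heap.getD j 0)
    (hB : ∀ j, 0 < j → j < heap.length → (j - 1) / 2 = pos → ni ≤ heap.getD j 0)
    (hpar : 0 < pos → heap.getD ((pos - 1) / 2) 0 ≤ ni) :
    IsHeapL (heap.set pos ni) := by
  intro j hj0 hjl
  rw [List.length_set] at hjl
  by_cases hj : j = pos
  · subst hj
    rw [getD_set_ne _ _ _ _ (by omega), getD_set_self _ _ _ h]
    exact hpar hj0
  · by_cases hpj : (j - 1) / 2 = pos
    · rw [hpj, getD_set_self _ _ _ h, getD_set_ne _ _ _ _ (fun e => hj e.symm)]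
      exact hB j hj0 hjl hpj
    · rw [getD_set_ne _ _ _ _ (fun e => hpj e.symm), getD_set_ne _ _ _ _ (fun e => hj e.symm)]
      exact hA j hj0 hjl hj hpj

theorem heap_siftdown (pos : Nat) : ∀ (heap : List Int) (ni : Int),
    pos < heap.length →
    (∀ j, 0 < j → j < heap.length → j ≠ pos → (j - 1) / 2 ≠ pos →
      heap.getD ((j - 1) / 2) 0 ≤ heap.getD j 0) →
    (∀ j, 0 < j → j < heap.length → (j - 1) / 2 = pos → ni ≤ heap.getD j 0) →
    (∀ j, 0 < j → j < heap.length → (j - 1) / 2 = pos → 0 < pos →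
      heap.getD ((pos - 1) / 2) 0 ≤ heap.getD j 0) →
    IsHeapL (pySiftdown heap 0 pos ni) := by
  induction pos using Nat.strong_induction_on with
  | _ pos ih =>
    intro heap ni h hA hB hB'
    rw [pySiftdown]
    by_cases h0 : 0 < pos
    · simp only [dif_pos h0]
      by_cases hni : ni < heap.getD ((pos - 1) / 2) 0
      · simp only [if_pos hni]
        refine ih ((pos - 1) / 2) (by omega) _ ni (by simp [List.length_set]; omega) ?_ ?_ ?_
        · -- pairs not involving the new hole (pos-1)/2
          intro j hj0 hjl hne hpne
          rw [List.length_set] at hjl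
          by_cases hj : j = pos
          · exact absurd (congrArg (fun x => (x - 1) / 2) hj) hpne
          · by_cases hpj : (j - 1) / 2 = pos
            · rw [hpj, getD_set_self _ _ _ h, getD_set_ne _ _ _ _ (fun e => hj e.symm)]
              exact hB' j hj0 hjl hpj h0
            · rw [getD_set_ne _ _ _ _ (fun e => hpj e.symm), getD_set_ne _ _ _ _ (fun e => hj e.symm)]
              exact hA j hj0 hjl hj hpj
        · -- newitem bounds the children of the new hole
          intro j hj0 hjl hpj
          rw [List.length_set] at hjl
          by_cases hj : j = pos
          · subst hj
            rw [getD_set_self _ _ _ h]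
            exact le_of_lt hni
          · rw [getD_set_ne _ _ _ _ (fun e => hj e.symm)]
            have h2 := hA j hj0 hjl hj (by omega)
            rw [hpj] at h2
            exact le_trans (le_of_lt hni) h2
        · -- the grandparent bounds the children of the new hole
          intro j hj0 hjl hpj hpp0
          rw [List.length_set] at hjl
          have hstep := hA ((pos - 1) / 2) hpp0 (by omega) (by omega) (by omega)
          rw [getD_set_ne _ _ _ _ (by omega)]
          by_cases hj : j = pos
          · subst hj
            rw [getD_set_self _ _ _ h]
            exact hstep
          · rw [getD_set_ne _ _ _ _ (fun e => hj e.symm)]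
            have h2 := hA j hj0 hjl hj (by omega)
            rw [hpj] at h2
            exact le_trans hstep h2
      · simp only [if_neg hni]
        exact isHeap_set heap pos ni h hA hB (fun _ => not_lt.mp hni)
    · simp only [dif_neg h0]
      exact isHeap_set heap pos ni h hA hB (fun c => absurd c h0)

theorem siftup_hA' (heap : List Int) (pos cp' : Nat) (h : pos < heap.length)
    (hcp : cp' < heap.length) (hgt : pos < cp') (hpc : (cp' - 1) / 2 = pos)
    (hmin : ∀ j, 0 < j → j < heap.length → (j - 1) / 2 = pos → heap.getD cp' 0 ≤ heap.getD j 0)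
    (hA : ∀ j, 0 < j → j < heap.length → j ≠ pos → (j - 1) / 2 ≠ pos →
      heap.getD ((j - 1) / 2) 0 ≤ heap.getD j 0)
    (hC : ∀ j, 0 < j → j < heap.length → (j - 1) / 2 = pos → 0 < pos →
      heap.getD ((pos - 1) / 2) 0 ≤ heap.getD j 0) :
    ∀ j, 0 < j → j < (heap.set pos (heap.getD cp' 0)).length → j ≠ cp' → (j - 1) / 2 ≠ cp' →
      (heap.set pos (heap.getD cp' 0)).getD ((j - 1) / 2) 0 ≤ (heap.set pos (heap.getD cp' 0)).getD j 0 := by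
  intro j hj0 hjl hne hpne
  rw [List.length_set] at hjl
  by_cases hj : j = pos
  · subst hj
    rw [getD_set_ne _ _ _ _ (by omega), getD_set_self _ _ _ h]
    exact hC cp' (by omega) hcp hpc hj0
  · by_cases hpj : (j - 1) / 2 = pos
    · rw [hpj, getD_set_self _ _ _ h, getD_set_ne _ _ _ _ (fun e => hj e.symm)]
      exact hmin j hj0 hjl hpj
    · rw [getD_set_ne _ _ _ _ (fun e => hpj e.symm), getD_set_ne _ _ _ _ (fun e => hj e.symm)]
      exact hA j hj0 hjl hj hpj

theorem siftup_hC' (heap : List Int) (pos cp' : Nat) (h : pos < heap.length)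
    (hgt : pos < cp') (hpc : (cp' - 1) / 2 = pos)
    (hA : ∀ j, 0 < j → j < heap.length → j ≠ pos → (j - 1) / 2 ≠ pos →
      heap.getD ((j - 1) / 2) 0 ≤ heap.getD j 0) :
    ∀ j, 0 < j → j < (heap.set pos (heap.getD cp' 0)).length → (j - 1) / 2 = cp' → 0 < cp' →
      (heap.set pos (heap.getD cp' 0)).getD ((cp' - 1) / 2) 0 ≤ (heap.set pos (heap.getD cp' 0)).getD j 0 := by
  intro j hj0 hjl hpj _
  rw [List.length_set] at hjl
  rw [hpc, getD_set_self _ _ _ h, getD_set_ne _ _ _ _ (by omega : pos ≠ j)]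
  have h2 := hA j hj0 hjl (by omega) (by omega)
  rw [hpj] at h2
  exact h2

theorem heap_siftupLoop (k : Nat) : ∀ (heap : List Int) (pos : Nat) (ni : Int),
    heap.length - pos ≤ k → pos < heap.length →
    (∀ j, 0 < j → j < heap.length → j ≠ pos → (j - 1) / 2 ≠ pos →
      heap.getD ((j - 1) / 2) 0 ≤ heap.getD j 0) →
    (∀ j, 0 < j → j < heap.length → (j - 1) / 2 = pos → 0 < pos →
      heap.getD ((pos - 1) / 2) 0 ≤ heap.getD j 0) →
    IsHeapL (pySiftupLoop heap 0 pos ni) := by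
  induction k using Nat.strong_induction_on with
  | _ k ih =>
    intro heap pos ni hk h hA hC
    rw [pySiftupLoop]
    by_cases hc : 2 * pos + 1 < heap.length
    · simp only [dif_pos hc]
      by_cases hcond : 2 * pos + 1 + 1 < heap.length ∧ ¬ (heap.getD (2 * pos + 1) 0 < heap.getD (2 * pos + 1 + 1) 0)
      · simp only [if_pos hcond]
        refine ih (k - 1) (by omega) _ (2 * pos + 1 + 1) ni (by simp [List.length_set]; omega)
          (by simp [List.length_set]; omega) ?_ ?_
        · refine siftup_hA' heap pos (2 * pos + 1 + 1) h hcond.1 (by omega) (by omega) ?_ hA hC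
          intro j hj0 hjl hpj
          have hj12 : j = 2 * pos + 1 ∨ j = 2 * pos + 1 + 1 := by omega
          rcases hj12 with e | e
          · subst e
            exact not_lt.mp hcond.2
          · subst e
            exact le_refl _
        · exact siftup_hC' heap pos (2 * pos + 1 + 1) h (by omega) (by omega) hA
      · simp only [if_neg hcond]
        refine ih (k - 1) (by omega) _ (2 * pos + 1) ni (by simp [List.length_set]; omega)
          (by simp [List.length_set]; omega) ?_ ?_
        · refine siftup_hA' heap pos (2 * pos + 1) h hc (by omega) (by omega) ?_ hA hC
          intro j hj0 hjl hpj
          have hj12 : j = 2 * pos + 1 ∨ j = 2 * pos + 1 + 1 := by omega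
          rcases hj12 with e | e
          · subst e
            exact le_refl _
          · subst e
            have hlt : heap.getD (2 * pos + 1) 0 < heap.getD (2 * pos + 1 + 1) 0 := by
              by_contra hx
              exact hcond ⟨by omega, hx⟩
            exact le_of_lt hlt
        · exact siftup_hC' heap pos (2 * pos + 1) h (by omega) (by omega) hA
    · simp only [dif_neg hc]
      refine heap_siftdown pos (heap.set pos ni) ni (by simpa using h) ?_ ?_ ?_
      · intro j hj0 hjl hne hpne
        rw [List.length_set] at hjl
        rw [getD_set_ne _ _ _ _ (fun e => hpne e.symm), getD_set_ne _ _ _ _ (fun e => hne e.symm)]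
        exact hA j hj0 hjl hne hpne
      · intro j hj0 hjl hpj
        rw [List.length_set] at hjl
        omega
      · intro j hj0 hjl hpj _
        rw [List.length_set] at hjl
        omega

theorem heap_push (heap : List Int) (x : Int) (hh : IsHeapL heap) : IsHeapL (pyHeappush heap x) := by
  unfold pyHeappush
  refine heap_siftdown heap.length (heap ++ [x]) x (by simp) ?_ ?_ ?_
  · intro j hj0 hjl hne hpne
    simp at hjl
    have hjlen : j < heap.length := by omega
    rw [getD_append_left _ _ _ hjlen, getD_append_left _ _ _ (by omega)]
    exact hh j hj0 hjlen
  · intro j hj0 hjl hpj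
    simp at hjl
    omega
  · intro j hj0 hjl hpj _
    simp at hjl
    omega

theorem mset_push (heap : List Int) (x : Int) :
    (↑(pyHeappush heap x) : Multiset Int) = (↑heap : Multiset Int) + {x} := by
  unfold pyHeappush
  have h := mset_siftdown heap.length (heap ++ [x]) 0 x (by simp)
  have hx : (heap ++ [x]).getD heap.length 0 = x := by
    rw [List.getD_eq_getElem _ _ (by simp)]
    simp
  rw [hx, coe_append_singleton] at h
  exact add_right_cancel h

-- the root of a heap is a lower bound for every slot
theorem heap_root_min (heap : List Int) (hh : IsHeapL heap) :
    ∀ j, j < heap.length → heap.getD 0 0 ≤ heap.getD j 0 := by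
  intro j
  induction j using Nat.strong_induction_on with
  | _ j ih =>
    intro hj
    rcases Nat.eq_zero_or_pos j with h0 | h0
    · subst h0
      exact le_refl _
    · exact le_trans (ih ((j - 1) / 2) (by omega) (by omega)) (hh j h0 hj)

theorem heap_pop (heap : List Int) (hne : heap ≠ []) (hh : IsHeapL heap) :
    ∃ h', pyHeappop heap = some (heap.getD 0 0, h') ∧ IsHeapL h' ∧
      (↑h' : Multiset Int) + {heap.getD 0 0} = (↑heap : Multiset Int) := by
  by_cases hr : heap.dropLast = []
  · cases heap with
    | nil => exact absurd rfl hne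
    | cons a t =>
      cases t with
      | cons b t2 => simp [List.dropLast] at hr
      | nil =>
        refine ⟨[], rfl, ?_, by simp⟩
        intro j hj0 hjl
        simp at hjl
  · have hsplit := List.dropLast_append_getLast hne
    have hlen : heap.length = heap.dropLast.length + 1 := by
      conv_lhs => rw [← hsplit]
      simp
    have hr0 : 0 < heap.dropLast.length := List.length_pos_iff.mpr hr
    have hget0 : heap.dropLast.getD 0 0 = heap.getD 0 0 := by
      conv_rhs => rw [← hsplit]
      rw [getD_append_left _ _ _ hr0]
    have hrestA : ∀ j, 0 < j → j < heap.dropLast.length → j ≠ 0 → (j - 1) / 2 ≠ 0 →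
        (heap.dropLast.set 0 (heap.getLast hne)).getD ((j - 1) / 2) 0
          ≤ (heap.dropLast.set 0 (heap.getLast hne)).getD j 0 := by
      intro j hj0 hjl hne0 hpne0
      rw [getD_set_ne _ _ _ _ (fun e => hpne0 e.symm), getD_set_ne _ _ _ _ (fun e => hne0 e.symm)]
      have e1 : heap.getD j 0 = heap.dropLast.getD j 0 := by
        conv_lhs => rw [← hsplit]
        exact getD_append_left _ _ _ hjl
      have e2 : heap.getD ((j - 1) / 2) 0 = heap.dropLast.getD ((j - 1) / 2) 0 := by
        conv_lhs => rw [← hsplit]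
        exact getD_append_left _ _ _ (by omega)
      rw [← e1, ← e2]
      exact hh j hj0 (by omega)
    refine ⟨pySiftupLoop (heap.dropLast.set 0 (heap.getLast hne)) 0 0 (heap.getLast hne), ?_, ?_, ?_⟩
    · unfold pyHeappop
      rw [List.getLast?_eq_some_getLast hne]
      have hie : heap.dropLast.isEmpty = false := by
        simpa using hr
      simp only [hie, Bool.false_eq_true, if_false, hget0]
    · refine heap_siftupLoop (heap.dropLast.set 0 (heap.getLast hne)).length _ 0 _
        (by omega) (by simp [List.length_set]; omega)
        (fun j hj0 hjl hne0 hpne0 => hrestA j hj0 (by simpa using hjl) hne0 hpne0)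
        (fun j _ _ _ hp => absurd hp (by omega))
    · have hsu := mset_siftupLoop ((heap.dropLast.set 0 (heap.getLast hne)).length)
        (heap.dropLast.set 0 (heap.getLast hne)) 0 0 (heap.getLast hne)
        (by omega) (by simp [List.length_set]; omega)
      rw [getD_set_self _ _ _ hr0] at hsu
      have hS := add_right_cancel hsu
      rw [hS, ← hget0, mset_set heap.dropLast 0 (heap.getLast hne) hr0, ← coe_append_singleton, hsplit]

-- the simulation: A's heap and B's list hold the same multiset of negatives
theorem goA_eq_goB (l : List Int) : ∀ (res ps : Int) (heap negs : List Int),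
    IsHeapL heap → (↑heap : Multiset Int) = (↑negs : Multiset Int) →
    goA l res ps heap = goB l res ps negs := by
  induction l with
  | nil => intro res ps heap negs _ _; rfl
  | cons n t ih =>
    intro res ps heap negs hh hm
    simp only [goA, goB]
    have hh' : IsHeapL (if n < 0 then pyHeappush heap n else heap) := by
      split
      · exact heap_push heap n hh
      · exact hh
    have hm' : (↑(if n < 0 then pyHeappush heap n else heap) : Multiset Int)
        = (↑(if n < 0 then negs ++ [n] else negs) : Multiset Int) := by
      split
      · rw [mset_push, coe_append_singleton, hm]
      · exact hm
    by_cases hps : ps + n < 0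
    · simp only [if_pos hps]
      by_cases hHe : (if n < 0 then pyHeappush heap n else heap) = []
      · have hNe : (if n < 0 then negs ++ [n] else negs) = [] := by
          rw [hHe] at hm'
          exact List.Perm.eq_nil (Multiset.coe_eq_coe.mp hm'.symm)
        rw [hHe, hNe]
        have hpopnil : pyHeappop [] = none := rfl
        have hminnil : PySem.List.min? ([] : List Int) (fun x => x) = none := rfl
        rw [hpopnil, hminnil]
        exact ih res (ps + n) [] [] (fun j hj0 hjl => absurd hjl (by simp)) rfl
      · obtain ⟨h'', hpop, hh'', hmset⟩ := heap_pop _ hHe hh'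
        have hNne : (if n < 0 then negs ++ [n] else negs) ≠ [] := by
          intro e
          apply hHe
          rw [e] at hm'
          exact List.Perm.eq_nil (Multiset.coe_eq_coe.mp hm')
        cases hmn : PySem.List.min? (if n < 0 then negs ++ [n] else negs) (fun x => x) with
        | none =>
          obtain ⟨x, xs, hcons⟩ := List.exists_cons_of_ne_nil hNne
          rw [hcons, PySem.List.min?_id_cons] at hmn
          exact absurd hmn (by simp)
        | some m =>
          have hmem : m ∈ (if n < 0 then negs ++ [n] else negs) := PySem.List.min?_mem hmn
          have hmin := PySem.List.min?_isMin hmn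
          have h0lt : 0 < (if n < 0 then pyHeappush heap n else heap).length :=
            List.length_pos_iff.mpr hHe
          have hrootmem : (if n < 0 then pyHeappush heap n else heap).getD 0 0
              ∈ (if n < 0 then negs ++ [n] else negs) := by
            have hmemH : (if n < 0 then pyHeappush heap n else heap).getD 0 0
                ∈ (if n < 0 then pyHeappush heap n else heap) := by
              rw [List.getD_eq_getElem _ _ h0lt]
              exact List.getElem_mem _
            rw [← Multiset.mem_coe, hm', Multiset.mem_coe] at hmemH
            exact hmemH
          have h1 : m ≤ (if n < 0 then pyHeappush heap n else heap).getD 0 0 :=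
            hmin _ hrootmem
          have h2 : (if n < 0 then pyHeappush heap n else heap).getD 0 0 ≤ m := by
            have hmH : m ∈ (if n < 0 then pyHeappush heap n else heap) := by
              rw [← Multiset.mem_coe, hm', Multiset.mem_coe]
              exact hmem
            obtain ⟨i, hi, hie⟩ := List.getElem_of_mem hmH
            have hroot := heap_root_min _ hh' i hi
            rw [List.getD_eq_getElem _ _ hi, hie] at hroot
            exact hroot
          have hm0 : m = (if n < 0 then pyHeappush heap n else heap).getD 0 0 := le_antisymm h1 h2
          rw [hpop]
          show goA t (res + 1) (ps + n - (if n < 0 then pyHeappush heap n else heap).getD 0 0) h''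
            = (match PySem.List.remove? (if n < 0 then negs ++ [n] else negs) m with
              | some negs'' => goB t (res + 1) (ps + n - m) negs''
              | none => goB t res (ps + n) (if n < 0 then negs ++ [n] else negs))
          rw [PySem.List.remove?_eq_some_erase _ _ hmem, ← hm0]
          show goA t (res + 1) (ps + n - m) h''
            = goB t (res + 1) (ps + n - m) ((if n < 0 then negs ++ [n] else negs).erase m)
          refine ih _ _ _ _ hh'' ?_
          have e1 : (↑((if n < 0 then negs ++ [n] else negs).erase m) : Multiset Int) + {m}
              = (↑(if n < 0 then negs ++ [n] else negs) : Multiset Int) := by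
            rw [add_comm, Multiset.singleton_add, ← Multiset.coe_erase,
              Multiset.cons_erase (Multiset.mem_coe.mpr hmem)]
          have e2 : (↑h'' : Multiset Int) + {m}
              = (↑(if n < 0 then negs ++ [n] else negs) : Multiset Int) := by
            rw [hm0, hmset]
            exact hm'
          exact add_right_cancel (e2.trans e1.symm)
    · rw [if_neg hps, if_neg hps]
      exact ih res (ps + n) _ _ hh' hm'

-- ===== VERDICT (by name: the statement is the Claim_ definition above) =====
theorem makePrefSumNonNegative_spec : Claim_equal_makePrefSumNonNegative := by
  intro nums _
  unfold Spec_makePrefSumNonNegative makePrefSumNonNegative makePrefSumNonNegative_alt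
  exact goA_eq_goB nums 0 0 [] [] (fun j hj0 hjl => absurd hjl (by simp)) rfl
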